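-- pv_equiv track=rewrite | github.com/wellqin/USTC | leetcode/editor/cn/[915]分割数组.py | partitionDisjoint1
-- ===== SOURCE A (Python) =====
-- from typing import List
--
-- def partitionDisjoint1(A: List[int]) -> int:
--     l_max = [0 for i in range(len(A))]
--     r_min = [0 for i in range(len(A))]
--     l_max[0] = A[0]
--     r_min[-1] = A[-1]
--     for i in range(1, len(A)):
--         l_max[i] = max(A[i], l_max[i-1])
--     for i in range(len(A)-2, -1, -1):
--         r_min[i] = min(A[i], r_min[i+1])
--
--     for i in range(1, len(A)):
--         if l_max[i-1] <= r_min[i]: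
--             return i
-- ===== SOURCE B (Python) =====
-- from typing import List
--
-- def partitionDisjoint1(A: List[int]) -> int:
--     # one left-to-right pass, O(1) extra space
--     left_max = cur_max = A[0]
--     ans = 1
--     for i in range(1, len(A)):
--         cur_max = max(cur_max, A[i])
--         if A[i] < left_max:
--             left_max = cur_max
--             ans = i + 1
--     return ans
-- ===== Notes on version B (the rewrite author's own statement) =====
-- stated objective: faster
-- what changed: Replaced the two precomputed prefix-max/suffix-min tables and the final scan by a single greedy left-to-right pass that keeps only the max of the committed left part and the running max, giving O(1) extra space.
-- outside the precondition, e.g. on partitionDisjoint1([2, 1]): A returns None, B returns 2; on partitionDisjoint1([5]): A returns None, B returns 1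
import Mathlib
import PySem

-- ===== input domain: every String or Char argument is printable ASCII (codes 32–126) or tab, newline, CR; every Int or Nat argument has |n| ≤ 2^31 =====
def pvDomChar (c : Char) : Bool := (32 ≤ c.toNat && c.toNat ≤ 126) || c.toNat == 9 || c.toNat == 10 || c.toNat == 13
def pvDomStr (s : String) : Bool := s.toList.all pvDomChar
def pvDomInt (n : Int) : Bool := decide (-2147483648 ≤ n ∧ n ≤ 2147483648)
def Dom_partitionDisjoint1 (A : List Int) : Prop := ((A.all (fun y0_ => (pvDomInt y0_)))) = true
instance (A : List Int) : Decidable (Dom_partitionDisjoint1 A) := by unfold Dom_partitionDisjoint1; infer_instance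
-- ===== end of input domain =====

-- B replaces A's two precomputed prefix-max/suffix-min tables by a single greedy left-to-right
-- pass keeping only two running maxima (O(1) extra space instead of O(n)).

-- ===== PORT A =====
-- for i in range(1, len(A)): l_max[i] = max(A[i], l_max[i-1])
def pvLmaxLoop (A : List Int) (lm : List Int) : List Int → List Int
  | [] => lm
  | i :: is =>
      pvLmaxLoop A
        (PySem.List.pySetD lm i (max (PySem.List.pyGetD A i 0) (PySem.List.pyGetD lm (i - 1) 0))) is

-- for i in range(len(A)-2, -1, -1): r_min[i] = min(A[i], r_min[i+1])
def pvRminLoop (A : List Int) (rm : List Int) : List Int → List Int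
  | [] => rm
  | i :: is =>
      pvRminLoop A
        (PySem.List.pySetD rm i (min (PySem.List.pyGetD A i 0) (PySem.List.pyGetD rm (i + 1) 0))) is

-- for i in range(1, len(A)): if l_max[i-1] <= r_min[i]: return i   (early return; none = fell off the end)
def pvFindLoop (lm rm : List Int) : List Int → Option Int
  | [] => none
  | i :: is =>
      if PySem.List.pyGetD lm (i - 1) 0 ≤ PySem.List.pyGetD rm i 0 then some i
      else pvFindLoop lm rm is

-- Python A returns None when the last loop finds nothing (incl. len(A) == 1) and raises IndexError
-- on []; both are outside Pre_ below, and '.getD 0' only fixes the Lean return type there.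
def partitionDisjoint1 (A : List Int) : Int :=
  let n : Int := PySem.List.len A
  let l_max0 := (PySem.List.pyRange 0 n 1).map (fun _ => (0 : Int))
  let r_min0 := (PySem.List.pyRange 0 n 1).map (fun _ => (0 : Int))
  let l_max1 := PySem.List.pySetD l_max0 0 (PySem.List.pyGetD A 0 0)
  let r_min1 := PySem.List.pySetD r_min0 (-1) (PySem.List.pyGetD A (-1) 0)
  let l_max := pvLmaxLoop A l_max1 (PySem.List.pyRange 1 n 1)
  let r_min := pvRminLoop A r_min1 (PySem.List.pyRange (n - 2) (-1) (-1))
  (pvFindLoop l_max r_min (PySem.List.pyRange 1 n 1)).getD 0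

-- ===== PORT B =====
-- the single pass of Source B: state (left_max, cur_max, ans), i the index of the current element
def pvAltLoop : List Int → Nat → Int → Int → Nat → Nat
  | [], _, _, _, ans => ans
  | x :: xs, i, leftMax, curMax, ans =>
      let c := max curMax x
      if x < leftMax then pvAltLoop xs (i + 1) c c (i + 1)
      else pvAltLoop xs (i + 1) leftMax c ans

def partitionDisjoint1_alt (A : List Int) : Int :=
  match A with
  | [] => 0        -- Python B raises IndexError on A[0] here; outside Pre_
  | a0 :: rest => (pvAltLoop rest 1 a0 a0 1 : Nat)

-- ===== PRECONDITION & SPEC =====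
-- Pre_ excludes exactly the inputs where Python A does not return an int: the empty list (IndexError)
-- and lists with no valid split point — including every single-element list — on which A falls off
-- the final loop and returns None.
def Pre_partitionDisjoint1 (A : List Int) : Prop :=
  ∃ i < A.length, 1 ≤ i ∧ ∀ j < i, ∀ k < A.length, i ≤ k → A.getD j 0 ≤ A.getD k 0

instance (A : List Int) : Decidable (Pre_partitionDisjoint1 A) := by
  unfold Pre_partitionDisjoint1; infer_instance

def pvWitness_partitionDisjoint1 : List Int := [1, 0, 2, 3]

def Spec_partitionDisjoint1 (A : List Int) (out : Int) : Prop := out = partitionDisjoint1_alt A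
instance (A : List Int) (out : Int) : Decidable (Spec_partitionDisjoint1 A out) := by
  unfold Spec_partitionDisjoint1; infer_instance

-- ===== CLAIM (what is proved, stated in full; the proofs are below) =====
def Claim_equal_partitionDisjoint1 : Prop :=
  ∀ (A : List Int), Dom_partitionDisjoint1 A → Pre_partitionDisjoint1 A →
    Spec_partitionDisjoint1 A (partitionDisjoint1 A)

-- ===== LEMMAS AND PROOFS =====

-- prefix maximum of A[0..j] and suffix minimum of A[j..n-1]
def pvPmax (A : List Int) : Nat → Int
  | 0 => A.getD 0 0
  | j + 1 => max (A.getD (j + 1) 0) (pvPmax A j)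

def pvSmin (A : List Int) (j : Nat) : Int :=
  (A.drop j).foldr min (A.getD (A.length - 1) 0)

-- i is a valid split length: 1 ≤ i < n and max(A[:i]) ≤ min(A[i:])
def pvValid (A : List Int) (i : Nat) : Prop :=
  1 ≤ i ∧ i < A.length ∧ pvPmax A (i - 1) ≤ pvSmin A i

@[reducible] def pvValidDec (A : List Int) : DecidablePred (pvValid A) := fun _ => by
  unfold pvValid; infer_instance

theorem pvPmax_le_iff (A : List Int) (j : Nat) (b : Int) :
    pvPmax A j ≤ b ↔ ∀ k ≤ j, A.getD k 0 ≤ b := by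
  induction j with
  | zero =>
    constructor
    · intro h k hk
      have : k = 0 := by omega
      simpa [this, pvPmax] using h
    · intro h
      simpa [pvPmax] using h 0 (le_refl 0)
  | succ j ih =>
    simp only [pvPmax, max_le_iff, ih]
    constructor
    · rintro ⟨h1, h2⟩ k hk
      rcases Nat.lt_or_ge k (j + 1) with hlt | hge
      · exact h2 k (Nat.lt_succ_iff.mp hlt)
      · have : k = j + 1 := by omega
        simpa [this] using h1
    · intro h
      exact ⟨h _ (le_refl _), fun k hk => h k (le_trans hk (Nat.le_succ j))⟩

theorem pvLe_pmax (A : List Int) {k j : Nat} (h : k ≤ j) : A.getD k 0 ≤ pvPmax A j := by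
  exact (pvPmax_le_iff A j (pvPmax A j)).mp (le_refl _) k h

theorem pvPmax_mono (A : List Int) {j j' : Nat} (h : j ≤ j') : pvPmax A j ≤ pvPmax A j' := by
  exact (pvPmax_le_iff A j (pvPmax A j')).mpr (fun k hk => pvLe_pmax A (le_trans hk h))

theorem pvSmin_succ (A : List Int) {j : Nat} (h : j < A.length) :
    pvSmin A j = min (A.getD j 0) (pvSmin A (j + 1)) := by
  unfold pvSmin
  rw [List.drop_eq_getElem_cons h, List.foldr_cons, List.getD_eq_getElem A 0 h]

theorem pvSmin_le (A : List Int) {j k : Nat} (hjk : j ≤ k) (hk : k < A.length) :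
    pvSmin A j ≤ A.getD k 0 := by
  have H : ∀ m j, A.length - j = m → j ≤ k → k < A.length → pvSmin A j ≤ A.getD k 0 := by
    intro m
    induction m with
    | zero => intro j h1 h2 h3; omega
    | succ m ih =>
      intro j h1 h2 h3
      have hj : j < A.length := by omega
      rw [pvSmin_succ A hj]
      rcases eq_or_lt_of_le h2 with rfl | hlt
      · exact min_le_left _ _
      · exact le_trans (min_le_right _ _) (ih (j + 1) (by omega) hlt h3)
  exact H _ j rfl hjk hk

theorem pvLe_smin (A : List Int) {j : Nat} (b : Int) (hj : j < A.length)
    (h : ∀ k, j ≤ k → k < A.length → b ≤ A.getD k 0) : b ≤ pvSmin A j := by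
  have H : ∀ m j, A.length - j = m → j < A.length →
      (∀ k, j ≤ k → k < A.length → b ≤ A.getD k 0) → b ≤ pvSmin A j := by
    intro m
    induction m with
    | zero => intro j h1 h2 h3; omega
    | succ m ih =>
      intro j h1 hj hall
      rw [pvSmin_succ A hj]
      refine le_min (hall j (le_refl j) hj) ?_
      by_cases hj1 : j + 1 < A.length
      · exact ih (j + 1) (by omega) hj1 (fun k hk1 hk2 => hall k (by omega) hk2)
      · have hlen : j + 1 = A.length := by omega
        have e : pvSmin A (j + 1) = A.getD (A.length - 1) 0 := by
          rw [hlen]; unfold pvSmin; rw [List.drop_length]; rfl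
        rw [e]
        have e2 : A.length - 1 = j := by omega
        rw [e2]
        exact hall j (le_refl j) hj
  exact H _ j rfl hj h

theorem pvValid_iff (A : List Int) (i : Nat) (h1 : 1 ≤ i) (h2 : i < A.length) :
    pvValid A i ↔ ∀ j < i, ∀ k < A.length, i ≤ k → A.getD j 0 ≤ A.getD k 0 := by
  unfold pvValid
  constructor
  · rintro ⟨-, -, hle⟩ j hj k hk hik
    exact le_trans (le_trans (pvLe_pmax A (by omega : j ≤ i - 1)) hle) (pvSmin_le A hik hk)
  · intro h
    refine ⟨h1, h2, pvLe_smin A _ h2 ?_⟩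
    intro k hik hk
    rw [pvPmax_le_iff]
    intro j hj
    exact h j (by omega) k hk hik

theorem pvGetD_set_self (l : List Int) (i : Nat) (v : Int) (h : i < l.length) :
    (l.set i v).getD i 0 = v := by
  simp [List.getD_eq_getElem?_getD, h]

theorem pvGetD_set_ne (l : List Int) {i j : Nat} (v : Int) (h : i ≠ j) :
    (l.set i v).getD j 0 = l.getD j 0 := by
  simp [List.getD_eq_getElem?_getD, h]

theorem pvSetD_neg_one (xs : List Int) (v : Int) (h : xs ≠ []) :
    PySem.List.pySetD xs (-1) v = xs.set (xs.length - 1) v := by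
  have hl : 0 < xs.length := by cases xs with | nil => exact absurd rfl h | cons a t => simp
  simp [PySem.List.pySetD, PySem.List.pySet?, PySem.List.pyIdx?, show 1 ≤ xs.length from hl]

theorem pvSmin_last (A : List Int) (h : A ≠ []) :
    pvSmin A (A.length - 1) = A.getD (A.length - 1) 0 := by
  have h0 : 0 < A.length := by cases h' : A with | nil => exact absurd h' h | cons a t => simp
  rw [pvSmin_succ A (by omega : A.length - 1 < A.length)]
  have e1 : A.length - 1 + 1 = A.length := by omega
  rw [e1]
  have e2 : pvSmin A A.length = A.getD (A.length - 1) 0 := by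
    unfold pvSmin; rw [List.drop_length]; rfl
  rw [e2, min_self]

theorem pvLmaxLoop_spec (A : List Int) :
    ∀ (m a : Nat) (lm : List Int), 1 ≤ a → a ≤ A.length → m = A.length - a →
      lm.length = A.length → (∀ j < a, lm.getD j 0 = pvPmax A j) →
      (pvLmaxLoop A lm (PySem.List.pyRange a A.length 1)).length = A.length ∧
      ∀ j < A.length, (pvLmaxLoop A lm (PySem.List.pyRange a A.length 1)).getD j 0 = pvPmax A j := by
  intro m
  induction m with
  | zero =>
    intro a lm h1 h2 h3 hlen hinv
    have ha : a = A.length := by omega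
    subst ha
    rw [PySem.List.pyRange_one_eq_nil (le_refl _)]
    exact ⟨hlen, fun j hj => hinv j hj⟩
  | succ m ih =>
    intro a lm h1 h2 h3 hlen hinv
    have ha : a < A.length := by omega
    rw [PySem.List.pyRange_one_cons (by exact_mod_cast ha)]
    simp only [pvLmaxLoop]
    have e1 : PySem.List.pyGetD A (a : Int) 0 = A.getD a 0 := by
      simp [PySem.List.pyGetD_natCast]
    have e3 : ((a : Int) - 1) = ((a - 1 : Nat) : Int) := by omega
    have e2 : PySem.List.pyGetD lm ((a : Int) - 1) 0 = pvPmax A (a - 1) := by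
      rw [e3, PySem.List.pyGetD_natCast]
      exact hinv (a - 1) (by omega)
    have e4 : PySem.List.pySetD lm (a : Int)
        (max (PySem.List.pyGetD A (a : Int) 0) (PySem.List.pyGetD lm ((a : Int) - 1) 0)) =
        lm.set a (max (A.getD a 0) (pvPmax A (a - 1))) := by
      rw [e1, e2, PySem.List.pySetD_natCast]
    rw [e4]
    have hv : max (A.getD a 0) (pvPmax A (a - 1)) = pvPmax A a := by
      obtain ⟨a', rfl⟩ := Nat.exists_eq_succ_of_ne_zero (by omega : a ≠ 0)
      simp [pvPmax]
    rw [hv]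
    have hcast : ((a : Int) + 1) = ((a + 1 : Nat) : Int) := by push_cast; ring
    rw [hcast]
    refine ih (a + 1) (lm.set a (pvPmax A a)) (by omega) (by omega) (by omega) ?_ ?_
    · simpa using hlen
    · intro j hj
      rcases Nat.lt_or_ge j a with hja | hja
      · rw [pvGetD_set_ne _ _ (by omega)]
        exact hinv j hja
      · have : j = a := by omega
        subst this
        exact pvGetD_set_self _ _ _ (by omega)

theorem pvRminLoop_spec (A : List Int) :
    ∀ (m : Nat) (a : Int) (rm : List Int), -1 ≤ a → a ≤ (A.length : Int) - 2 →
      m = (a + 1).toNat → rm.length = A.length →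
      (∀ j : Nat, a < (j : Int) → j < A.length → rm.getD j 0 = pvSmin A j) →
      (pvRminLoop A rm (PySem.List.pyRange a (-1) (-1))).length = A.length ∧
      ∀ j < A.length, (pvRminLoop A rm (PySem.List.pyRange a (-1) (-1))).getD j 0 = pvSmin A j := by
  intro m
  induction m with
  | zero =>
    intro a rm h1 h2 h3 hlen hinv
    have ha : a = -1 := by omega
    subst ha
    rw [PySem.List.pyRange_neg_one_eq_nil (le_refl _)]
    exact ⟨hlen, fun j hj => hinv j (by omega) hj⟩
  | succ m ih =>
    intro a rm h1 h2 h3 hlen hinv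
    have ha0 : 0 ≤ a := by omega
    obtain ⟨b, rfl⟩ : ∃ b : Nat, a = (b : Int) := ⟨a.toNat, by omega⟩
    have hblen : b + 1 < A.length := by omega
    rw [PySem.List.pyRange_neg_one_cons (by omega : (-1 : Int) < (b : Int))]
    simp only [pvRminLoop]
    have e1 : PySem.List.pyGetD A (b : Int) 0 = A.getD b 0 := by
      simp [PySem.List.pyGetD_natCast]
    have e3 : ((b : Int) + 1) = ((b + 1 : Nat) : Int) := by push_cast; ring
    have e2 : PySem.List.pyGetD rm ((b : Int) + 1) 0 = pvSmin A (b + 1) := by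
      rw [e3, PySem.List.pyGetD_natCast]
      exact hinv (b + 1) (by omega) hblen
    have e4 : PySem.List.pySetD rm (b : Int)
        (min (PySem.List.pyGetD A (b : Int) 0) (PySem.List.pyGetD rm ((b : Int) + 1) 0)) =
        rm.set b (min (A.getD b 0) (pvSmin A (b + 1))) := by
      rw [e1, e2, PySem.List.pySetD_natCast]
    rw [e4]
    have hv : min (A.getD b 0) (pvSmin A (b + 1)) = pvSmin A b := by
      rw [← pvSmin_succ A (by omega : b < A.length)]
    rw [hv]
    have hcast : ((b : Int) - 1) = ((b : Int) - 1) := rfl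
    refine ih ((b : Int) - 1) (rm.set b (pvSmin A b)) (by omega) (by omega) (by omega) ?_ ?_
    · simpa using hlen
    · intro j hj hjlen
      rcases Nat.lt_or_ge b j with hbj | hbj
      · rw [pvGetD_set_ne _ _ (by omega)]
        exact hinv j (by omega) hjlen
      · have : j = b := by omega
        subst this
        exact pvGetD_set_self _ _ _ (by omega)

theorem pvFindLoop_spec (A : List Int) (lm rm : List Int)
    (hlm : ∀ j < A.length, lm.getD j 0 = pvPmax A j)
    (hrm : ∀ j < A.length, rm.getD j 0 = pvSmin A j) :
    ∀ (m a : Nat), 1 ≤ a → a ≤ A.length → m = A.length - a →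
      ∀ p : Nat, pvValid A p → a ≤ p → (∀ q, pvValid A q → a ≤ q → p ≤ q) →
      pvFindLoop lm rm (PySem.List.pyRange a A.length 1) = some (p : Int) := by
  intro m
  induction m with
  | zero =>
    intro a h1 h2 h3 p hp hap hmin
    have := hp.2.1
    omega
  | succ m ih =>
    intro a h1 h2 h3 p hp hap hmin
    have ha : a < A.length := by omega
    rw [PySem.List.pyRange_one_cons (by exact_mod_cast ha)]
    simp only [pvFindLoop]
    have e3 : ((a : Int) - 1) = ((a - 1 : Nat) : Int) := by omega
    have e1 : PySem.List.pyGetD lm ((a : Int) - 1) 0 = pvPmax A (a - 1) := by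
      rw [e3, PySem.List.pyGetD_natCast]
      exact hlm (a - 1) (by omega)
    have e2 : PySem.List.pyGetD rm (a : Int) 0 = pvSmin A a := by
      rw [PySem.List.pyGetD_natCast]
      exact hrm a ha
    rw [e1, e2]
    by_cases hg : pvPmax A (a - 1) ≤ pvSmin A a
    · have hva : pvValid A a := ⟨h1, ha, hg⟩
      have hpa : p = a := le_antisymm (hmin a hva (le_refl a)) hap
      rw [if_pos hg, hpa]
    · have hne : p ≠ a := by
        intro h
        exact hg (by { have := hp.2.2; rw [h] at this; exact this })
      rw [if_neg hg]
      have hcast : ((a : Int) + 1) = ((a + 1 : Nat) : Int) := by push_cast; ring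
      rw [hcast]
      exact ih (a + 1) (by omega) (by omega) (by omega) p hp (by omega)
        (fun q hq haq => hmin q hq (by omega))

theorem pvAltLoop_spec (A : List Int) :
    ∀ (rest : List Int) (i : Nat) (L C : Int) (a : Nat),
      rest = A.drop i → 1 ≤ i → i ≤ A.length → C = pvPmax A (i - 1) →
      1 ≤ a → a ≤ i → L = pvPmax A (a - 1) →
      (∀ k, a ≤ k → k < i → L ≤ A.getD k 0) →
      (∀ q, pvValid A q → a ≤ q) →
      ∀ p, pvValid A p → (∀ q, pvValid A q → p ≤ q) → pvAltLoop rest i L C a = p := by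
  intro rest
  induction rest with
  | nil =>
    intro i L C a hrest h1i h2i hC h1a h2a hL hrange hminq p hp hpmin
    have hilen : A.length ≤ i := List.drop_eq_nil_iff.mp hrest.symm
    have hieq : i = A.length := by omega
    have hap : a ≤ p := hminq p hp
    have haval : pvValid A a := by
      refine ⟨h1a, by have := hp.2.1; omega, ?_⟩
      refine pvLe_smin A _ (by have := hp.2.1; omega) ?_
      intro k hk1 hk2
      have := hrange k hk1 (by omega)
      rw [hL] at this
      exact this
    have hpa : p ≤ a := hpmin a haval
    have : a = p := by omega
    simpa [pvAltLoop] using this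
  | cons x xs ih =>
    intro i L C a hrest h1i h2i hC h1a h2a hL hrange hminq p hp hpmin
    have hi : i < A.length := by
      by_contra h'
      have : A.drop i = [] := List.drop_eq_nil_iff.mpr (by omega)
      rw [this] at hrest
      exact absurd hrest (by simp)
    have hdrop : A.drop i = A[i] :: A.drop (i + 1) := List.drop_eq_getElem_cons hi
    rw [hdrop] at hrest
    have hx : x = A.getD i 0 := by
      have := (List.cons.injEq _ _ _ _).mp hrest
      rw [this.1, List.getD_eq_getElem A 0 hi]
    have hxs : xs = A.drop (i + 1) := ((List.cons.injEq _ _ _ _).mp hrest).2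
    have hc : max C x = pvPmax A i := by
      obtain ⟨i', rfl⟩ := Nat.exists_eq_succ_of_ne_zero (by omega : i ≠ 0)
      rw [hC, hx]
      simp [pvPmax, max_comm]
    simp only [pvAltLoop]
    by_cases hcase : x < L
    · rw [if_pos hcase]
      refine ih (i + 1) (max C x) (max C x) (i + 1) hxs (by omega) (by omega) (by simpa using hc)
        (by omega) (le_refl _) (by simpa using hc) (fun k hk1 hk2 => by omega) ?_ p hp hpmin
      intro q hq
      by_contra hqi
      have hqle : q ≤ i := by omega
      have haq : a ≤ q := hminq q hq
      have hq1 : pvPmax A (q - 1) ≤ pvSmin A q := hq.2.2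
      have hq2 : pvSmin A q ≤ A.getD i 0 := pvSmin_le A (by omega) hi
      have hq3 : L ≤ pvPmax A (q - 1) := by
        rw [hL]
        exact pvPmax_mono A (by omega)
      rw [hx] at hcase
      omega
    · rw [if_neg hcase]
      refine ih (i + 1) L (max C x) a hxs (by omega) (by omega) (by simpa using hc)
        h1a (by omega) hL ?_ hminq p hp hpmin
      intro k hk1 hk2
      rcases Nat.lt_or_ge k i with hki | hki
      · exact hrange k hk1 hki
      · have : k = i := by omega
        subst this
        rw [hx] at hcase
        omega

-- ===== VERDICT (by name: the statement is the Claim_ definition above) =====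
theorem partitionDisjoint1_spec : Claim_equal_partitionDisjoint1 := by
  intro A hDom hPre
  unfold Spec_partitionDisjoint1
  obtain ⟨i0, hi0len, hi01, hcond⟩ := hPre
  have hval : ∃ i, pvValid A i := ⟨i0, (pvValid_iff A i0 hi01 hi0len).mpr hcond⟩
  obtain ⟨p, hp, hpmin⟩ : ∃ p, pvValid A p ∧ ∀ q, pvValid A q → p ≤ q :=
    ⟨@Nat.find _ (pvValidDec A) hval, @Nat.find_spec _ (pvValidDec A) hval,
      fun q hq => @Nat.find_min' _ (pvValidDec A) hval q hq⟩
  have h2len : 2 ≤ A.length := by have := hp.1; have := hp.2.1; omega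
  have hAne : A ≠ [] := by intro h; rw [h] at h2len; simp at h2len
  -- A's side: the table scan returns the least valid split index p
  have hAside : partitionDisjoint1 A = (p : Int) := by
    show (pvFindLoop
        (pvLmaxLoop A
          (PySem.List.pySetD ((PySem.List.pyRange 0 ((A.length : Int)) 1).map (fun _ => (0 : Int)))
            0 (PySem.List.pyGetD A 0 0))
          (PySem.List.pyRange (((1 : Nat) : Int)) ((A.length : Int)) 1))
        (pvRminLoop A
          (PySem.List.pySetD ((PySem.List.pyRange 0 ((A.length : Int)) 1).map (fun _ => (0 : Int)))
            (-1) (PySem.List.pyGetD A (-1) 0))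
          (PySem.List.pyRange ((A.length : Int) - 2) (-1) (-1)))
        (PySem.List.pyRange (((1 : Nat) : Int)) ((A.length : Int)) 1)).getD 0 = (p : Int)
    have hl0len : ((PySem.List.pyRange 0 (A.length : Int) 1).map (fun _ => (0 : Int))).length
        = A.length := by
      simp [PySem.List.length_pyRange_one]
    have hlm1 : PySem.List.pySetD
        ((PySem.List.pyRange 0 (A.length : Int) 1).map (fun _ => (0 : Int))) 0
        (PySem.List.pyGetD A 0 0)
        = ((PySem.List.pyRange 0 (A.length : Int) 1).map (fun _ => (0 : Int))).set 0
            (A.getD 0 0) := by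
      rw [PySem.List.pyGetD_zero, PySem.List.pySetD_of_nonneg _ _ (by norm_num)]
      rfl
    have hrm1 : PySem.List.pySetD
        ((PySem.List.pyRange 0 (A.length : Int) 1).map (fun _ => (0 : Int))) (-1)
        (PySem.List.pyGetD A (-1) 0)
        = ((PySem.List.pyRange 0 (A.length : Int) 1).map (fun _ => (0 : Int))).set
            (A.length - 1) (A.getD (A.length - 1) 0) := by
      rw [PySem.List.pyGetD_neg_one A 0 hAne, List.getLast_eq_getElem,
        pvSetD_neg_one _ _ (by
          intro h
          rw [h] at hl0len
          simp at hl0len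
          omega),
        hl0len, List.getD_eq_getElem A 0 (by omega)]
    rw [hlm1, hrm1]
    have hlmtab := pvLmaxLoop_spec A (A.length - 1) 1
      (((PySem.List.pyRange 0 (A.length : Int) 1).map (fun _ => (0 : Int))).set 0 (A.getD 0 0))
      (le_refl 1) (by omega) (by omega) (by simp)
      (by
        intro j hj
        have : j = 0 := by omega
        subst this
        rw [pvGetD_set_self _ _ _ (by omega)]
        rfl)
    have hrmtab := pvRminLoop_spec A (A.length - 1) ((A.length : Int) - 2)
      (((PySem.List.pyRange 0 (A.length : Int) 1).map (fun _ => (0 : Int))).set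
        (A.length - 1) (A.getD (A.length - 1) 0))
      (by omega) (le_refl _) (by omega) (by simp)
      (by
        intro j hj hjlen
        have : j = A.length - 1 := by omega
        subst this
        rw [pvGetD_set_self _ _ _ (by omega), pvSmin_last A hAne])
    have hfind := pvFindLoop_spec A _ _ hlmtab.2 hrmtab.2 (A.length - 1) 1
      (le_refl 1) (by omega) (by omega) p hp hp.1 (fun q hq _ => hpmin q hq)
    rw [hfind]
    rfl
  -- B's side: the greedy pass returns the same least valid split index p
  have hBside : partitionDisjoint1_alt A = (p : Int) := by
    obtain ⟨a0, rest, rfl⟩ : ∃ a0 rest, A = a0 :: rest := by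
      cases A with
      | nil => simp at h2len
      | cons h t => exact ⟨h, t, rfl⟩
    simp only [partitionDisjoint1_alt]
    have halt := pvAltLoop_spec (a0 :: rest) rest 1 a0 a0 1 rfl (le_refl 1) (by simp)
      (by rfl) (le_refl 1) (le_refl 1) (by rfl)
      (fun k hk1 hk2 => by omega) (fun q hq => hq.1) p hp hpmin
    rw [halt]
  rw [hAside, hBside]
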